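-- pv_equiv track=rewrite | github.com/jiahao42/evil-mastermind | utils.py | substr_tokenize
-- ===== SOURCE A (Python) =====
-- def substr_tokenize(tokens, token_set, max_len):
--   res = []
--   my_len = 0
--   ordered_token_set = sorted(list(token_set))
--   for token in tokens:
--     if my_len > max_len: break
--     can_be_split = False
--     if len(token) > 6:
--       for tk in ordered_token_set:
--         if len(tk) <= 1: continue
--         if token[:len(tk)] == tk:
--           rest = token[len(tk):]
--           if len(rest) > 1 and rest in ordered_token_set:
--             res.append(tk)
--             res.append(rest)
--             can_be_split = True
--             my_len += 2
--             break
--     if not can_be_split: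
--       res.append(token)
--       my_len += 1
--   return res
-- ===== SOURCE B (Python) =====
-- def substr_tokenize(tokens, token_set, max_len):
--     # Faster: hash-set membership; for each long token try split positions
--     # shortest-prefix-first instead of scanning the whole sorted vocabulary.
--     known = set(token_set)
--     res = []
--     count = 0
--     for token in tokens:
--         if count > max_len:
--             break
--         pair = None
--         if len(token) > 6:
--             for k in range(2, len(token) - 1):
--                 head, tail = token[:k], token[k:]
--                 if head in known and tail in known:
--                     pair = (head, tail)
--                     break
--         if pair is None:
--             res.append(token)
--             count += 1
--         else:
--             res.extend(pair)
--             count += 2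
--     return res
-- ===== Notes on version B (the rewrite author's own statement) =====
-- stated objective: faster
-- what changed: Replaces the scan of the whole sorted vocabulary per long token with O(1) hash-set membership tests over the token's split positions tried shortest-prefix-first (lexicographic minimum among prefixes of one token = shortest prefix, so the chosen split is identical).
import Mathlib
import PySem

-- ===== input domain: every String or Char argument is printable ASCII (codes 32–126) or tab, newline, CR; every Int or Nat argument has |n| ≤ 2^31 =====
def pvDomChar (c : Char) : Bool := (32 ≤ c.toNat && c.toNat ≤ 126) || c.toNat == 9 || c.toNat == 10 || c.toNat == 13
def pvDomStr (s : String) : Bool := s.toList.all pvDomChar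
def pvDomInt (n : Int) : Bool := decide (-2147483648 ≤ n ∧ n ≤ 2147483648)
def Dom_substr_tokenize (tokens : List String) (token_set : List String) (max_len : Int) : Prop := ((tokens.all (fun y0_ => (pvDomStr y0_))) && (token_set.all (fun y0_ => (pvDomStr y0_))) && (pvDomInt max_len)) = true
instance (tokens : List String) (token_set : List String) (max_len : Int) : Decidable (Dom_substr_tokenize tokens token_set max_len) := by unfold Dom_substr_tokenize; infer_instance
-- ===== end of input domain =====

-- B replaces A's per-token scan of the whole sorted vocabulary by shortest-prefix-first
-- split-position search with set-membership tests (objective: faster).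

-- ===== PORT A =====
-- inner 'for tk in ordered_token_set: …' loop of A (returns the first (tk, rest) split, if any)
def pvFindSplit (token : String) (full : List String) : List String → Option (String × String)
  | [] => none
  | tk :: tl =>
    if PySem.Str.len tk ≤ 1 then pvFindSplit token full tl
    else if PySem.Str.slice token none (some (PySem.Str.len tk)) = tk then
      let rest := PySem.Str.slice token (some (PySem.Str.len tk)) none
      if 1 < PySem.Str.len rest ∧ rest ∈ full then some (tk, rest)
      else pvFindSplit token full tl
    else pvFindSplit token full tl

-- outer 'for token in tokens: …' loop of A, state (res, my_len)
def pvALoop (ordered : List String) (max_len : Int) : List String → List String → Int → List String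
  | [], res, _ => res
  | token :: rest, res, my_len =>
    if my_len > max_len then res
    else
      match (if 6 < PySem.Str.len token then pvFindSplit token ordered ordered else none) with
      | some (tk, r) => pvALoop ordered max_len rest (res ++ [tk, r]) (my_len + 2)
      | none => pvALoop ordered max_len rest (res ++ [token]) (my_len + 1)

def substr_tokenize (tokens : List String) (token_set : List String) (max_len : Int) : List String :=
  let ordered_token_set := PySem.List.sorted token_set (fun x => x) false
  pvALoop ordered_token_set max_len tokens [] 0

-- ===== PORT B =====
-- inner 'for k in range(2, len(token) - 1): …' loop of B (first split position that works)
def pvBScan (known : PySem.Set String) (token : String) : List Int → Option (String × String)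
  | [] => none
  | k :: ks =>
    let head := PySem.Str.slice token none (some k)
    let tail := PySem.Str.slice token (some k) none
    if head ∈ known ∧ tail ∈ known then some (head, tail)
    else pvBScan known token ks

-- outer 'for token in tokens: …' loop of B, state (res, count)
def pvBLoop (known : PySem.Set String) (max_len : Int) : List String → List String → Int → List String
  | [], res, _ => res
  | token :: rest, res, count =>
    if count > max_len then res
    else
      match (if 6 < PySem.Str.len token then
               pvBScan known token (PySem.List.pyRange 2 (PySem.Str.len token - 1) 1)
             else none) with
      | none => pvBLoop known max_len rest (res ++ [token]) (count + 1)
      | some (h, t) => pvBLoop known max_len rest (res ++ [h, t]) (count + 2)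

def substr_tokenize_alt (tokens : List String) (token_set : List String) (max_len : Int) : List String :=
  let known := PySem.Set.ofList token_set
  pvBLoop known max_len tokens [] 0

-- ===== PRECONDITION & SPEC =====
def Spec_substr_tokenize (tokens : List String) (token_set : List String) (max_len : Int) (out : List String) : Prop := out = substr_tokenize_alt tokens token_set max_len
instance (tokens : List String) (token_set : List String) (max_len : Int) (out : List String) : Decidable (Spec_substr_tokenize tokens token_set max_len out) := by unfold Spec_substr_tokenize; infer_instance

-- ===== CLAIM (what is proved, stated in full; the proofs are below) =====
def Claim_equal_substr_tokenize : Prop := ∀ (tokens : List String) (token_set : List String) (max_len : Int), Dom_substr_tokenize tokens token_set max_len → Spec_substr_tokenize tokens token_set max_len (substr_tokenize tokens token_set max_len)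

-- ===== LEMMAS AND PROOFS =====

-- A's inner-loop test, as a Bool predicate on a vocabulary entry tk
def pvPA (token : String) (full : List String) (tk : String) : Bool :=
  decide (1 < PySem.Str.len tk) &&
  decide (PySem.Str.slice token none (some (PySem.Str.len tk)) = tk) &&
  decide (1 < PySem.Str.len (PySem.Str.slice token (some (PySem.Str.len tk)) none) ∧
          PySem.Str.slice token (some (PySem.Str.len tk)) none ∈ full)

-- B's inner-loop test, as a Bool predicate on a split position k
def pvQB (known : PySem.Set String) (token : String) (k : Int) : Bool :=
  decide (PySem.Str.slice token none (some k) ∈ known ∧ PySem.Str.slice token (some k) none ∈ known)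

theorem pvPA_true_iff (token : String) (full : List String) (tk : String) :
    pvPA token full tk = true ↔
      (1 < PySem.Str.len tk ∧ PySem.Str.slice token none (some (PySem.Str.len tk)) = tk ∧
       (1 < PySem.Str.len (PySem.Str.slice token (some (PySem.Str.len tk)) none) ∧
        PySem.Str.slice token (some (PySem.Str.len tk)) none ∈ full)) := by
  simp only [pvPA, Bool.and_eq_true, decide_eq_true_eq, and_assoc]

theorem pvFindSplit_eq_find? (token : String) (full l : List String) :
    pvFindSplit token full l
      = (l.find? (pvPA token full)).map
          (fun tk => (tk, PySem.Str.slice token (some (PySem.Str.len tk)) none)) := by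
  induction l with
  | nil => rfl
  | cons tk tl ih =>
    rw [List.find?_cons]
    cases hpa : pvPA token full tk with
    | true =>
      obtain ⟨hA, hB, hC⟩ := (pvPA_true_iff token full tk).1 hpa
      simp only [pvFindSplit]
      rw [if_neg (by omega), if_pos hB, if_pos hC]
      rfl
    | false =>
      have hnp : ¬ (1 < PySem.Str.len tk ∧ PySem.Str.slice token none (some (PySem.Str.len tk)) = tk ∧
          (1 < PySem.Str.len (PySem.Str.slice token (some (PySem.Str.len tk)) none) ∧
           PySem.Str.slice token (some (PySem.Str.len tk)) none ∈ full)) := by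
        intro hp
        rw [(pvPA_true_iff token full tk).2 hp] at hpa
        simp at hpa
      simp only [pvFindSplit]
      split_ifs with h1 h2 h3
      · exact ih
      · exact absurd ⟨by omega, h2, h3⟩ hnp
      · exact ih
      · exact ih

theorem pvBScan_eq_find? (known : PySem.Set String) (token : String) (ks : List Int) :
    pvBScan known token ks
      = (ks.find? (pvQB known token)).map
          (fun k => (PySem.Str.slice token none (some k), PySem.Str.slice token (some k) none)) := by
  induction ks with
  | nil => rfl
  | cons k ks ih =>
    rw [List.find?_cons]
    cases hq : pvQB known token k with
    | true =>
      have h := of_decide_eq_true hq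
      simp only [pvBScan]
      rw [if_pos h]
      rfl
    | false =>
      have hnp : ¬ _ := of_decide_eq_false hq
      simp only [pvBScan]
      rw [if_neg hnp]
      exact ih

-- list-lexicographic order: a prefix is ≤
theorem pvPrefix_le (l1 l2 : List Char) (h : l1 <+: l2) : l1 ≤ l2 := by
  obtain ⟨s, rfl⟩ := h
  cases s with
  | nil => simp
  | cons c s =>
    apply le_of_lt
    rw [show ((l1 : List Char) < l1 ++ c :: s) = (List.lt l1 (l1 ++ c :: s)) from rfl,
        List.lt_iff_lex_lt]
    induction l1 with
    | nil => exact List.Lex.nil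
    | cons a tl ih => exact List.Lex.cons ih

theorem pvTake_toList (token : String) (j : Nat) :
    (PySem.Str.slice token none (some (j : Int))).toList = token.toList.take j := by
  simp [PySem.Str.toList_slice, PySem.Chars.slice_eq_listSlice, PySem.List.slice_to_natCast]

theorem pvDrop_toList (token : String) (j : Nat) :
    (PySem.Str.slice token (some (j : Int)) none).toList = token.toList.drop j := by
  simp [PySem.Str.toList_slice, PySem.Chars.slice_eq_listSlice, PySem.List.slice_from_natCast]

-- length of the clamped prefix/suffix slices
theorem pvLen_take (token : String) (j : Nat) (h : j ≤ token.toList.length) :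
    PySem.Str.len (PySem.Str.slice token none (some (j : Int))) = (j : Int) := by
  rw [PySem.Str.len_eq, pvTake_toList, List.length_take]
  omega

-- characterisation of A's test on a vocabulary entry
theorem pvPA_iff (token : String) (S : List String) (tk : String) :
    pvPA token (PySem.List.sorted S (fun x => x) false) tk = true ↔
      ∃ j : Nat, 2 ≤ j ∧ j + 2 ≤ token.toList.length ∧
        tk = PySem.Str.slice token none (some (j : Int)) ∧
        PySem.Str.slice token (some (j : Int)) none ∈ S := by
  rw [pvPA_true_iff]
  constructor
  · rintro ⟨hA, hB, hC1, hC2⟩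
    rw [PySem.Str.len_eq tk] at hA hB hC1 hC2
    set m := tk.toList.length with hm
    have htake : (PySem.Str.slice token none (some (m : Int))).toList = token.toList.take m :=
      pvTake_toList token m
    have heq : token.toList.take m = tk.toList := by rw [← htake, hB]
    have hmn : m ≤ token.toList.length := by
      have := congrArg List.length heq
      rw [List.length_take] at this
      omega
    rw [PySem.Str.len_eq, pvDrop_toList, List.length_drop] at hC1
    refine ⟨m, by omega, by omega, ?_, ?_⟩
    · rw [String.ext_iff, htake, heq]
    · exact (PySem.List.mem_sorted S (fun x => x) false _).1 hC2
  · rintro ⟨j, hj2, hjn, htk, hmem⟩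
    have hlen : PySem.Str.len tk = (j : Int) := by
      rw [htk]; exact pvLen_take token j (by omega)
    rw [hlen]
    refine ⟨by omega, htk.symm, ?_, ?_⟩
    · rw [PySem.Str.len_eq, pvDrop_toList, List.length_drop]; omega
    · exact (PySem.List.mem_sorted S (fun x => x) false _).2 hmem

-- the heart: A's scan of the sorted vocabulary finds exactly B's shortest split
theorem pvInner_eq (token : String) (S : List String) :
    pvFindSplit token (PySem.List.sorted S (fun x => x) false)
        (PySem.List.sorted S (fun x => x) false)
      = pvBScan (PySem.Set.ofList S) token
          (PySem.List.pyRange 2 (PySem.Str.len token - 1) 1) := by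
  rw [pvFindSplit_eq_find?, pvBScan_eq_find?]
  set L := PySem.List.sorted S (fun x => x) false with hL
  set K := PySem.Set.ofList S with hK
  set R := PySem.List.pyRange 2 (PySem.Str.len token - 1) 1 with hR
  have hR_mem : ∀ k : Int, k ∈ R ↔ 2 ≤ k ∧ k < (token.toList.length : Int) - 1 := by
    intro k
    rw [hR, PySem.List.mem_pyRange_one, PySem.Str.len_eq]
  have hq_iff : ∀ j : Nat, pvQB K token (j : Int) = true ↔
      (PySem.Str.slice token none (some (j : Int)) ∈ S ∧
       PySem.Str.slice token (some (j : Int)) none ∈ S) := by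
    intro j
    simp only [pvQB, decide_eq_true_eq, hK, PySem.Set.mem_ofList]
  cases hB : R.find? (pvQB K token) with
  | none =>
    rw [List.find?_eq_none] at hB
    have hA : L.find? (pvPA token L) = none := by
      rw [List.find?_eq_none]
      intro tk htk hpa
      obtain ⟨j, hj2, hjn, htkeq, hdmem⟩ := (pvPA_iff token S tk).1 hpa
      have htmem : PySem.Str.slice token none (some (j : Int)) ∈ S := by
        rw [← htkeq]; exact (PySem.List.mem_sorted S (fun x => x) false tk).1 htk
      have hjR : ((j : Nat) : Int) ∈ R := (hR_mem _).2 ⟨by omega, by omega⟩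
      exact hB _ hjR ((hq_iff j).2 ⟨htmem, hdmem⟩)
    rw [hA]; rfl
  | some k =>
    obtain ⟨hqk, as, bs, hsplit, hprior⟩ := List.find?_eq_some_iff_append.1 hB
    have hkR : k ∈ R := List.mem_of_find?_eq_some hB
    have hk := (hR_mem k).1 hkR
    have hkj0 : ((k.toNat : Nat) : Int) = k := Int.toNat_of_nonneg (by omega)
    set j0 := k.toNat with hj0
    have hj02 : 2 ≤ j0 := by omega
    have hj0n : j0 + 2 ≤ token.toList.length := by omega
    have hqk' : PySem.Str.slice token none (some (j0 : Int)) ∈ S ∧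
        PySem.Str.slice token (some (j0 : Int)) none ∈ S := by
      apply (hq_iff j0).1
      rw [hkj0]; exact hqk
    -- elements of R before k are exactly those smaller than k
    have hRpw : R.Pairwise (· < ·) := by rw [hR]; exact PySem.List.pairwise_lt_pyRange_one 2 _
    have hbs_gt : ∀ x ∈ bs, k < x := by
      have := hsplit ▸ hRpw
      rw [List.pairwise_append] at this
      exact (List.pairwise_cons.1 this.2.1).1
    have hmin : ∀ j : Nat, 2 ≤ j → j + 2 ≤ token.toList.length →
        PySem.Str.slice token none (some (j : Int)) ∈ S →
        PySem.Str.slice token (some (j : Int)) none ∈ S → j0 ≤ j := by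
      intro j h2 hjn hts hds
      by_contra hlt
      push Not at hlt
      have hjR : ((j : Nat) : Int) ∈ R := (hR_mem _).2 ⟨by omega, by omega⟩
      have hjas : ((j : Nat) : Int) ∈ as := by
        rcases List.mem_append.1 (hsplit ▸ hjR) with h | h
        · exact h
        · rcases List.mem_cons.1 h with h | h
          · exfalso; omega
          · exfalso; have := hbs_gt _ h; omega
      have hgen := hprior _ hjas
      rw [(hq_iff j).2 ⟨hts, hds⟩] at hgen
      simp at hgen
    -- A's scan finds exactly B's shortest split prefix
    have hpa0 : pvPA token L (PySem.Str.slice token none (some (j0 : Int))) = true :=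
      (pvPA_iff token S _).2 ⟨j0, hj02, hj0n, rfl, hqk'.2⟩
    have hmemL : PySem.Str.slice token none (some (j0 : Int)) ∈ L :=
      (PySem.List.mem_sorted S (fun x => x) false _).2 hqk'.1
    cases hLf : L.find? (pvPA token L) with
    | none =>
      exact absurd hpa0 (List.find?_eq_none.1 hLf _ hmemL)
    | some m =>
      obtain ⟨hpam, as', bs', hsplit', hprior'⟩ := List.find?_eq_some_iff_append.1 hLf
      obtain ⟨j1, hj12, hj1n, hmeq, hd1⟩ := (pvPA_iff token S m).1 hpam
      have hmS : m ∈ S :=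
        (PySem.List.mem_sorted S (fun x => x) false m).1 (List.mem_of_find?_eq_some hLf)
      have hj0j1 : j0 ≤ j1 := hmin j1 hj12 hj1n (hmeq ▸ hmS) hd1
      have hle1 : PySem.Str.slice token none (some (j0 : Int)) ≤ m := by
        rw [hmeq]
        apply String.le_iff_toList_le.2
        rw [pvTake_toList, pvTake_toList]
        exact pvPrefix_le _ _ (List.take_prefix_take_left hj0j1)
      have hLpw : L.Pairwise (fun a b => a ≤ b) := PySem.List.sorted_pairwise S (fun x => x)
      have hm_eq : m = PySem.Str.slice token none (some (j0 : Int)) := by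
        have hmem' := hsplit' ▸ hmemL
        rcases List.mem_append.1 hmem' with h | h
        · exfalso
          have := hprior' _ h
          rw [hpa0] at this
          simp at this
        · rcases List.mem_cons.1 h with h | h
          · exact h.symm
          · have hpw := hsplit' ▸ hLpw
            rw [List.pairwise_append] at hpw
            exact le_antisymm ((List.pairwise_cons.1 hpw.2.1).1 _ h) hle1
      rw [hm_eq]
      simp only [Option.map_some]
      have hlen0 : PySem.Str.len (PySem.Str.slice token none (some (j0 : Int))) = (j0 : Int) :=
        pvLen_take token j0 (by omega)
      rw [hlen0, hkj0]

theorem pvLoops_eq (S : List String) (max_len : Int) (tokens res : List String) (c : Int) :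
    pvALoop (PySem.List.sorted S (fun x => x) false) max_len tokens res c
      = pvBLoop (PySem.Set.ofList S) max_len tokens res c := by
  induction tokens generalizing res c with
  | nil => rfl
  | cons token rest ih =>
    simp only [pvALoop, pvBLoop, pvInner_eq token S]
    split_ifs with h1 h2 <;> try rfl
    · cases hfs : pvBScan (PySem.Set.ofList S) token
        (PySem.List.pyRange 2 (PySem.Str.len token - 1) 1) with
      | none => exact ih _ _
      | some p => cases p; exact ih _ _
    · exact ih _ _

-- ===== VERDICT (by name: the statement is the Claim_ definition above) =====
theorem substr_tokenize_spec : Claim_equal_substr_tokenize := by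
  intro tokens token_set max_len _
  unfold Spec_substr_tokenize substr_tokenize substr_tokenize_alt
  exact pvLoops_eq token_set max_len tokens [] 0
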